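-- pv_equiv track=rewrite | github.com/acdh-oeaw/AMC_Corpus_Biases | scripts/utils/extend_verticals.py | add_lemma_vocab
-- ===== SOURCE A (Python) =====
-- def update_vocab(vocab, entity, id_counter, in_ent=False):
--     eid = -1
--
--     if(entity in vocab):
--         vocab[entity][1] += 1 if(not in_ent) else 0
--         eid = vocab[entity][0]
--     else:
--         eid = id_counter
--         vocab[entity] = [id_counter, 1]
--         id_counter += 1
--
--     return (eid, id_counter)
--
-- def add_lemma_vocab(rftt_probs, entity_vocab, id_counter):
--     lemma = rftt_probs[3][:-2]
--     if(lemma == "<unknown>"):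
--         lemma = rftt_probs[0]
--
--     if("|" in lemma):
--         lemmas = lemma.split("|")
--         (ent_id, id_counter) = update_vocab(entity_vocab, lemmas[0].lower(), id_counter)
--         for lemma_part in lemmas[1:]:
--             (_, id_counter) = update_vocab(entity_vocab, lemma_part.lower(), id_counter)
--     else:
--         (ent_id, id_counter) = update_vocab(entity_vocab, lemma.lower(), id_counter)
--
--     return (ent_id, id_counter)
-- ===== SOURCE B (Python) =====
-- def add_lemma_vocab(rftt_probs, entity_vocab, id_counter):
--     lemma = rftt_probs[3][:-2]
--     if lemma == "<unknown>":
--         lemma = rftt_probs[0]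
--
--     parts = [p.lower() for p in lemma.split("|")]
--     first = parts[0]
--     ent_id = entity_vocab[first][0] if first in entity_vocab else id_counter
--
--     for part in dict.fromkeys(parts):
--         n = parts.count(part)
--         if part in entity_vocab:
--             entity_vocab[part][1] += n
--         else:
--             entity_vocab[part] = [id_counter, n]
--             id_counter += 1
--
--     return (ent_id, id_counter)
-- ===== Notes on version B (the rewrite author's own statement) =====
-- stated objective: alternative
-- what changed: B drops the update_vocab helper and the pipe/no-pipe branch: it always splits and lowercases once, computes ent_id up front from the first part, then aggregates duplicate parts (ordered dedup + per-part counts) and merges each distinct part into the vocab exactly once, instead of A's per-occurrence helper calls.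
import Mathlib
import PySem

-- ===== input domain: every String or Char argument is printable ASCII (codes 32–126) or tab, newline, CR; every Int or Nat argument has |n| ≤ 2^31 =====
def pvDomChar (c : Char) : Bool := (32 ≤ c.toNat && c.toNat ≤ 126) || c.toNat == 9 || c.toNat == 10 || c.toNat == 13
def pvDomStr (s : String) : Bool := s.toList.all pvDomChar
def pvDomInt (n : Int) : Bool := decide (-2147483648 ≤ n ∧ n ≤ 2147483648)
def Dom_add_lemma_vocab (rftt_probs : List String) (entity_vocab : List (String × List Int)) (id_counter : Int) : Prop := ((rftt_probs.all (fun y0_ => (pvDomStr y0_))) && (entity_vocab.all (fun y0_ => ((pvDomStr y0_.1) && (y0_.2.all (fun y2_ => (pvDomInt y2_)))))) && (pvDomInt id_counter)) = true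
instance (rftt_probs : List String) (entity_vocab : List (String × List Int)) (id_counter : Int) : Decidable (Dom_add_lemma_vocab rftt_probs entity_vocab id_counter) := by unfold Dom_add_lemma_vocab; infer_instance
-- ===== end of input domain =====

-- B replaces A's per-occurrence helper calls and pipe/no-pipe branch with one aggregate-then-merge
-- pass (ordered dedup + per-part counts), computing ent_id up front; equal return value, same dict
-- mutation (the theorems below are about the return value).

-- ===== PORT A =====
-- vocab[entity][1] += 1 / vocab[entity][0] are ported with pySetD/pyGetD: exact whenever the stored
-- value has length ≥ 2 (Pre_ guarantees this for every consulted key; shorter values make Python raise).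
def update_vocab (vocab : PySem.Dict String (List Int)) (entity : String) (id_counter : Int) (in_ent : Bool) : (Int × Int) × PySem.Dict String (List Int) :=
  if vocab.contains entity then
    let v := vocab.getD entity []
    let v' := PySem.List.pySetD v 1 (PySem.List.pyGetD v 1 0 + (if !in_ent then 1 else 0))
    ((PySem.List.pyGetD v' 0 0, id_counter), vocab.insert entity v')
  else
    ((id_counter, id_counter + 1), vocab.insert entity [id_counter, 1])

def add_lemma_vocab (rftt_probs : List String) (entity_vocab : List (String × List Int)) (id_counter : Int) : Int × Int :=
  match PySem.List.pyGet? rftt_probs 3 with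
  | none => (0, 0)  -- rftt_probs[3] raises IndexError; Pre_ excludes this
  | some s3 =>
    let lemma0 := PySem.Str.slice s3 none (some (-2))
    let lem := if lemma0 == "<unknown>" then PySem.List.pyGetD rftt_probs 0 "" else lemma0
    let vocab := PySem.Dict.mk entity_vocab
    if PySem.Str.isIn "|" lem then
      -- lem.split("|"): separator nonempty, so Chars.splitOn is exact
      let lemmas := (PySem.Chars.splitOn lem.toList ['|']).map String.ofList
      let r := update_vocab vocab (PySem.Str.lower (PySem.List.pyGetD lemmas 0 "")) id_counter false
      let fin := (PySem.List.slice lemmas (some 1) none).foldl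
        (fun st lp =>
          let u := update_vocab st.1 (PySem.Str.lower lp) st.2 false
          (u.2, u.1.2)) (r.2, r.1.2)
      (r.1.1, fin.2)
    else
      let r := update_vocab vocab (PySem.Str.lower lem) id_counter false
      (r.1.1, r.1.2)

-- ===== PORT B =====
def add_lemma_vocab_alt (rftt_probs : List String) (entity_vocab : List (String × List Int)) (id_counter : Int) : Int × Int :=
  match PySem.List.pyGet? rftt_probs 3 with
  | none => (0, 0)  -- rftt_probs[3] raises IndexError; Pre_ excludes this
  | some s3 =>
    let lemma0 := PySem.Str.slice s3 none (some (-2))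
    let lem := if lemma0 == "<unknown>" then PySem.List.pyGetD rftt_probs 0 "" else lemma0
    let parts := ((PySem.Chars.splitOn lem.toList ['|']).map String.ofList).map PySem.Str.lower
    let first := PySem.List.pyGetD parts 0 ""
    let vocab := PySem.Dict.mk entity_vocab
    let ent_id := if vocab.contains first then PySem.List.pyGetD (vocab.getD first []) 0 0 else id_counter
    -- dict.fromkeys(parts) → PySem.List.dedup; parts.count(part) → List.count
    let fin := (PySem.List.dedup parts).foldl
      (fun st p =>
        let n : Int := (parts.count p : Int)
        if st.1.contains p then
          let v := st.1.getD p []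
          (st.1.insert p (PySem.List.pySetD v 1 (PySem.List.pyGetD v 1 0 + n)), st.2)
        else
          (st.1.insert p [st.2, n], st.2 + 1))
      (vocab, id_counter)
    (ent_id, fin.2)

-- ===== PRECONDITION & SPEC =====
-- The lemma parts A consults, recomputed from the input's shape (slice of rftt_probs[3] / rftt_probs[0],
-- split on '|', lowercased); used only to state which vocab entries A actually reads.
def pvPartsOf (rftt_probs : List String) : List String :=
  match PySem.List.pyGet? rftt_probs 3 with
  | none => []
  | some s3 =>
    let lemma0 := PySem.Str.slice s3 none (some (-2))
    let lem := if lemma0 == "<unknown>" then PySem.List.pyGetD rftt_probs 0 "" else lemma0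
    ((PySem.Chars.splitOn lem.toList ['|']).map String.ofList).map PySem.Str.lower

-- Pre_ excludes: (a) rftt_probs shorter than 4 (A raises IndexError at rftt_probs[3]); (b) association
-- lists with duplicate keys, where the assoc-list↔dict correspondence is ambiguous (a Python dict
-- can never carry them); (c) inputs where a consulted vocab entry has
-- fewer than 2 ints (A raises IndexError at vocab[entity][1] += 1).
def Pre_add_lemma_vocab (rftt_probs : List String) (entity_vocab : List (String × List Int)) (id_counter : Int) : Prop :=
  4 ≤ rftt_probs.length ∧ (entity_vocab.map Prod.fst).Nodup ∧
    ∀ p ∈ pvPartsOf rftt_probs, 2 ≤ ((PySem.Dict.mk entity_vocab).getD p [0, 0]).length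

instance (rftt_probs : List String) (entity_vocab : List (String × List Int)) (id_counter : Int) : Decidable (Pre_add_lemma_vocab rftt_probs entity_vocab id_counter) := by unfold Pre_add_lemma_vocab; infer_instance

def pvWitness_add_lemma_vocab : List String × (List (String × List Int)) × Int :=
  (["x", "y", "z", "abXY"], [("k", [7, 3])], 5)

def Spec_add_lemma_vocab (rftt_probs : List String) (entity_vocab : List (String × List Int)) (id_counter : Int) (out : Int × Int) : Prop := out = add_lemma_vocab_alt rftt_probs entity_vocab id_counter
instance (rftt_probs : List String) (entity_vocab : List (String × List Int)) (id_counter : Int) (out : Int × Int) : Decidable (Spec_add_lemma_vocab rftt_probs entity_vocab id_counter out) := by unfold Spec_add_lemma_vocab; infer_instance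

-- ===== CLAIM (what is proved, stated in full; the proofs are below) =====
def Claim_equal_add_lemma_vocab : Prop := ∀ (rftt_probs : List String) (entity_vocab : List (String × List Int)) (id_counter : Int), Dom_add_lemma_vocab rftt_probs entity_vocab id_counter → Pre_add_lemma_vocab rftt_probs entity_vocab id_counter → Spec_add_lemma_vocab rftt_probs entity_vocab id_counter (add_lemma_vocab rftt_probs entity_vocab id_counter)

-- ===== LEMMAS AND PROOFS =====

theorem get0_set1 (v : List Int) (x : Int) : PySem.List.pyGetD (PySem.List.pySetD v 1 x) 0 0 = PySem.List.pyGetD v 0 0 := by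
  match v with
  | [] => rfl
  | [a] => rfl
  | a :: b :: t =>
    have h : (0:Int) ≤ (t.length:Int) + 1 := by positivity
    simp [PySem.List.pySetD, PySem.List.pySet?, PySem.List.pyGetD, PySem.List.pyGet?, PySem.List.pyIdx?, h]

def newCount : List String → (String → Bool) → Int
  | [], _ => 0
  | p :: t, has => if has p then newCount t has else 1 + newCount t (fun q => q == p || has q)

theorem newCount_congr (l : List String) (h h' : String → Bool) (hp : ∀ q, h q = h' q) : newCount l h = newCount l h' := by
  induction l generalizing h h' with
  | nil => rfl
  | cons p t ih =>
    simp only [newCount, hp p]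
    split
    · exact ih h h' hp
    · exact congrArg (1 + ·) (ih _ _ (fun q => by rw [hp q]))

theorem newCount_filter (l : List String) (p : String) (has : String → Bool) (hp : has p = true) :
    newCount (l.filter (fun x => !(x == p))) has = newCount l has := by
  induction l generalizing has with
  | nil => rfl
  | cons x t ih =>
    by_cases hxp : x = p
    · subst hxp
      simp only [List.filter_cons, beq_self_eq_true, Bool.not_true, Bool.false_eq_true, if_false]
      simp only [newCount, hp, if_pos]
      exact ih has hp
    · have hbx : (!(x == p)) = true := by simp [hxp]
      simp only [List.filter_cons, hbx, if_pos]
      simp only [newCount]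
      by_cases hx : has x = true
      · simp only [hx, if_pos]; exact ih has hp
      · simp only [Bool.not_eq_true] at hx
        simp only [hx, if_neg Bool.false_ne_true]
        refine congrArg (1 + ·) (ih _ ?_)
        simp [hp]

theorem newCount_dedup (l : List String) (has : String → Bool) :
    newCount (PySem.List.dedup l) has = newCount l has := by
  rw [PySem.List.dedup_eq_ofList]
  induction l generalizing has with
  | nil => rfl
  | cons p t ih =>
    rw [PySem.Set.ofList_cons]
    show newCount (p :: List.filter (fun y => !(y == p)) (PySem.Set.ofList t)) has = _
    simp only [newCount]
    by_cases hp : has p = true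
    · simp only [hp, if_pos]
      rw [newCount_filter _ _ _ hp, ih]
    · simp only [Bool.not_eq_true] at hp
      simp only [hp, if_neg Bool.false_ne_true]
      refine congrArg (1 + ·) ?_
      rw [newCount_filter, ih]
      simp

def stepA (st : PySem.Dict String (List Int) × Int) (p : String) : PySem.Dict String (List Int) × Int :=
  let u := update_vocab st.1 p st.2 false
  (u.2, u.1.2)

def stepB (parts : List String) (st : PySem.Dict String (List Int) × Int) (p : String) : PySem.Dict String (List Int) × Int :=
  let n : Int := (parts.count p : Int)
  if st.1.contains p then
    let v := st.1.getD p []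
    (st.1.insert p (PySem.List.pySetD v 1 (PySem.List.pyGetD v 1 0 + n)), st.2)
  else
    (st.1.insert p [st.2, n], st.2 + 1)

theorem contains_insert_fun (d : PySem.Dict String (List Int)) (p : String) (v : List Int) (hp : d.contains p = true) (q : String) :
    (d.insert p v).contains q = d.contains q := by
  rw [PySem.Dict.contains_insert]
  by_cases h : q = p
  · subst h; simp [hp]
  · simp [h]

theorem foldA_snd (qs : List String) (st : PySem.Dict String (List Int) × Int) :
    (qs.foldl stepA st).2 = st.2 + newCount qs st.1.contains := by
  induction qs generalizing st with
  | nil => simp [newCount]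
  | cons p t ih =>
    rw [List.foldl_cons, ih]
    by_cases hp : st.1.contains p = true
    · have : stepA st p = ((st.1.insert p (PySem.List.pySetD (st.1.getD p []) 1 (PySem.List.pyGetD (st.1.getD p []) 1 0 + 1))), st.2) := by
        simp [stepA, update_vocab, hp]
      rw [this]
      simp only [newCount, hp, if_pos]
      rw [newCount_congr _ _ _ (contains_insert_fun st.1 p _ hp)]
    · have hp' : st.1.contains p = false := by simpa using hp
      have : stepA st p = ((st.1.insert p [st.2, 1]), st.2 + 1) := by
        simp [stepA, update_vocab, hp']
      rw [this]
      simp only [newCount, hp', if_neg Bool.false_ne_true]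
      rw [newCount_congr _ _ (fun q => q == p || st.1.contains q)
        (fun q => by rw [PySem.Dict.contains_insert])]
      ring

theorem foldB_snd (parts qs : List String) (st : PySem.Dict String (List Int) × Int) :
    (qs.foldl (stepB parts) st).2 = st.2 + newCount qs st.1.contains := by
  induction qs generalizing st with
  | nil => simp [newCount]
  | cons p t ih =>
    rw [List.foldl_cons, ih]
    by_cases hp : st.1.contains p = true
    · have : stepB parts st p = ((st.1.insert p (PySem.List.pySetD (st.1.getD p []) 1 (PySem.List.pyGetD (st.1.getD p []) 1 0 + (parts.count p : Int)))), st.2) := by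
        simp [stepB, hp]
      rw [this]
      simp only [newCount, hp, if_pos]
      rw [newCount_congr _ _ _ (contains_insert_fun st.1 p _ hp)]
    · have hp' : st.1.contains p = false := by simpa using hp
      have : stepB parts st p = ((st.1.insert p [st.2, (parts.count p : Int)]), st.2 + 1) := by
        simp [stepB, hp']
      rw [this]
      simp only [newCount, hp', if_neg Bool.false_ne_true]
      rw [newCount_congr _ _ (fun q => q == p || st.1.contains q)
        (fun q => by rw [PySem.Dict.contains_insert])]
      ring

theorem splitOn_go_ne_nil (sep : List Char) (fuel : Nat) (l cur : List Char) (acc : List (List Char)) :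
    PySem.Chars.splitOn.go sep fuel l cur acc ≠ [] := by
  induction fuel generalizing l cur acc with
  | zero => simp [PySem.Chars.splitOn.go]
  | succ n ih =>
    cases l with
    | nil => simp [PySem.Chars.splitOn.go]
    | cons c rest =>
      rw [PySem.Chars.splitOn.go]
      split
      · exact ih _ _ _
      · exact ih _ _ _

theorem splitOn_ne_nil (l sep : List Char) : PySem.Chars.splitOn l sep ≠ [] := by
  rw [PySem.Chars.splitOn]
  exact splitOn_go_ne_nil _ _ _ _ _

theorem splitOn_go_no_sep (c0 : Char) (fuel : Nat) (l cur : List Char) (acc : List (List Char))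
    (hfuel : l.length < fuel) (hmem : c0 ∉ l) :
    PySem.Chars.splitOn.go [c0] fuel l cur acc = ((cur.reverse ++ l) :: acc).reverse := by
  induction fuel generalizing l cur acc with
  | zero => omega
  | succ n ih =>
    cases l with
    | nil => simp [PySem.Chars.splitOn.go]
    | cons c rest =>
      rw [PySem.Chars.splitOn.go]
      have hc : c0 ≠ c := by simp at hmem; tauto
      have hpre : [c0].isPrefixOf (c :: rest) = false := by
        simp [List.isPrefixOf, hc]
      rw [if_neg (by simp [hpre])]
      rw [ih rest (c :: cur) acc (by simpa using Nat.lt_of_succ_lt_succ hfuel) (by simp at hmem; tauto)]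
      simp

theorem splitOn_no_sep (l : List Char) (c0 : Char) (hmem : c0 ∉ l) :
    PySem.Chars.splitOn l [c0] = [l] := by
  rw [PySem.Chars.splitOn, splitOn_go_no_sep c0 _ l [] [] (by omega) hmem]
  simp

-- one-call form of A on an already-extracted key (used for both branches' first component)
theorem updA_fst (vocab : PySem.Dict String (List Int)) (key : String) (c : Int) :
    (update_vocab vocab key c false).1.1 =
      (if vocab.contains key then PySem.List.pyGetD (vocab.getD key []) 0 0 else c) := by
  by_cases h : vocab.contains key = true
  · simp [update_vocab, h, get0_set1]
  · simp only [Bool.not_eq_true] at h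
    simp [update_vocab, h]

def coreA (vocab : PySem.Dict String (List Int)) (id_counter : Int) (lem : String) : Int × Int :=
  if PySem.Str.isIn "|" lem then
    let lemmas := (PySem.Chars.splitOn lem.toList ['|']).map String.ofList
    let r := update_vocab vocab (PySem.Str.lower (PySem.List.pyGetD lemmas 0 "")) id_counter false
    let fin := (PySem.List.slice lemmas (some 1) none).foldl
      (fun st lp =>
        let u := update_vocab st.1 (PySem.Str.lower lp) st.2 false
        (u.2, u.1.2)) (r.2, r.1.2)
    (r.1.1, fin.2)
  else
    let r := update_vocab vocab (PySem.Str.lower lem) id_counter false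
    (r.1.1, r.1.2)

def coreB (vocab : PySem.Dict String (List Int)) (id_counter : Int) (lem : String) : Int × Int :=
  let parts := ((PySem.Chars.splitOn lem.toList ['|']).map String.ofList).map PySem.Str.lower
  let first := PySem.List.pyGetD parts 0 ""
  let ent_id := if vocab.contains first then PySem.List.pyGetD (vocab.getD first []) 0 0 else id_counter
  let fin := (PySem.List.dedup parts).foldl (stepB parts) (vocab, id_counter)
  (ent_id, fin.2)

theorem coreB_snd (vocab : PySem.Dict String (List Int)) (c : Int) (lem : String) :
    (coreB vocab c lem).2 = c + newCount (((PySem.Chars.splitOn lem.toList ['|']).map String.ofList).map PySem.Str.lower) vocab.contains := by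
  show ((PySem.List.dedup _).foldl (stepB _) (vocab, c)).2 = _
  rw [foldB_snd, newCount_dedup]

theorem core_eq (vocab : PySem.Dict String (List Int)) (c : Int) (lem : String) :
    coreA vocab c lem = coreB vocab c lem := by
  have hne : (PySem.Chars.splitOn lem.toList ['|']).map String.ofList ≠ [] :=
    fun h => splitOn_ne_nil lem.toList ['|'] (by simpa using h)
  obtain ⟨x, xs, hxx⟩ := List.exists_cons_of_ne_nil hne
  refine Prod.ext ?_ ?_
  · -- first components
    have hB1 : (coreB vocab c lem).1 =
        (if vocab.contains (PySem.Str.lower x) then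
          PySem.List.pyGetD (vocab.getD (PySem.Str.lower x) []) 0 0 else c) := by
      show (if vocab.contains (PySem.List.pyGetD (((PySem.Chars.splitOn lem.toList ['|']).map String.ofList).map PySem.Str.lower) 0 "") then _ else _) = _
      rw [hxx, List.map_cons, PySem.List.pyGetD_zero_cons]
    rw [hB1]
    by_cases hin : PySem.Str.isIn "|" lem = true
    · simp only [coreA, hin, if_true]
      rw [updA_fst, hxx, PySem.List.pyGetD_zero_cons]
    · have hmem : '|' ∉ lem.toList := by
        intro hm
        exact hin ((PySem.Str.isIn_iff_infix "|" lem).2 (by simpa using (List.singleton_infix_iff '|' lem.toList).2 hm))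
      have hsplit : PySem.Chars.splitOn lem.toList ['|'] = [lem.toList] := splitOn_no_sep lem.toList '|' hmem
      have hx : x = lem := by
        have h := hxx
        rw [hsplit] at h
        simp only [List.map_cons, List.map_nil, String.ofList_toList] at h
        injection h with h1 h2
        exact h1.symm
      have hin' : PySem.Str.isIn "|" lem = false := by simpa using hin
      simp only [coreA, hin', Bool.false_eq_true, if_false]
      rw [updA_fst, hx]
  · -- second components
    rw [coreB_snd]
    by_cases hin : PySem.Str.isIn "|" lem = true
    · simp only [coreA, hin, if_true]
      rw [hxx, PySem.List.slice_from_one]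
      simp only [List.tail_cons]
      have hinit : ((update_vocab vocab (PySem.Str.lower (PySem.List.pyGetD (x :: xs) 0 "")) c false).2,
           (update_vocab vocab (PySem.Str.lower (PySem.List.pyGetD (x :: xs) 0 "")) c false).1.2)
           = stepA (vocab, c) (PySem.Str.lower x) := by
        rw [PySem.List.pyGetD_zero_cons]; rfl
      rw [hinit]
      have hstep : (fun (st : PySem.Dict String (List Int) × Int) (lp : String) =>
          let u := update_vocab st.1 (PySem.Str.lower lp) st.2 false
          (u.2, u.1.2)) = (fun st lp => stepA st (PySem.Str.lower lp)) := rfl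
      rw [hstep]
      have hfold : xs.foldl (fun st lp => stepA st (PySem.Str.lower lp)) (stepA (vocab, c) (PySem.Str.lower x))
          = ((x :: xs).map PySem.Str.lower).foldl stepA (vocab, c) := by
        rw [List.foldl_map, List.foldl_cons]
      rw [hfold, foldA_snd]
    · have hmem : '|' ∉ lem.toList := by
        intro hm
        exact hin ((PySem.Str.isIn_iff_infix "|" lem).2 (by simpa using (List.singleton_infix_iff '|' lem.toList).2 hm))
      have hsplit : PySem.Chars.splitOn lem.toList ['|'] = [lem.toList] := splitOn_no_sep lem.toList '|' hmem
      have hin' : PySem.Str.isIn "|" lem = false := by simpa using hin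
      simp only [coreA, hin', Bool.false_eq_true, if_false]
      rw [hsplit]
      simp only [List.map_cons, List.map_nil, String.ofList_toList]
      by_cases hc : vocab.contains (PySem.Str.lower lem) = true
      · simp [update_vocab, hc, newCount]
      · simp only [Bool.not_eq_true] at hc
        simp [update_vocab, hc, newCount]

theorem main_eq (rftt_probs : List String) (entity_vocab : List (String × List Int)) (id_counter : Int) :
    add_lemma_vocab rftt_probs entity_vocab id_counter = add_lemma_vocab_alt rftt_probs entity_vocab id_counter := by
  unfold add_lemma_vocab add_lemma_vocab_alt
  cases h3 : PySem.List.pyGet? rftt_probs 3 with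
  | none => rfl
  | some s3 =>
    exact core_eq (PySem.Dict.mk entity_vocab) id_counter
      (if PySem.Str.slice s3 none (some (-2)) == "<unknown>" then PySem.List.pyGetD rftt_probs 0 "" else PySem.Str.slice s3 none (some (-2)))

-- ===== VERDICT (by name: the statement is the Claim_ definition above) =====
theorem add_lemma_vocab_spec : Claim_equal_add_lemma_vocab := by
  intro rftt_probs entity_vocab id_counter _ _
  unfold Spec_add_lemma_vocab
  exact main_eq rftt_probs entity_vocab id_counter
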